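-- pv_equiv track=rewrite | github.com/liruileay/data_structure_in_python | data_structure_python/question/chapter3_binary_tree/question23.py | set_pos
-- ===== SOURCE A (Python) =====
-- def set_pos(p, pi, pj, n, ni, nj, s, si, map):
-- 	if pi > pj:
-- 		return si
-- 	s[si] = p[pi]
-- 	si -= 1
-- 	i = map.get(p[pi])
-- 	si = set_pos(p, pj - nj + i + 1, pj, n, i + 1, nj, s, si, map)
-- 	return set_pos(p, pi + 1, pi + i - ni, n, ni, i - 1, s, si, map)
-- ===== SOURCE B (Python) =====
-- def _post(pre, ino):
--     if not pre:
--         return []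
--     root = pre[0]
--     k = ino.index(root)
--     return _post(pre[1:k + 1], ino[:k]) + _post(pre[k + 1:], ino[k + 1:]) + [root]
--
--
-- def set_pos(p, pi, pj, n, ni, nj, s, si, map):
--     if pi > pj:
--         return si
--     out = _post(p[pi:pj + 1], n[ni:nj + 1])
--     s[si - len(out) + 1:si + 1] = out
--     return si - len(out)
-- ===== Notes on version B (the rewrite author's own statement) =====
-- stated objective: alternative
-- what changed: Instead of A's double recursion over (pi,pj,ni,nj) index ranges with map lookups and element-by-element decreasing writes, B slices out the preorder/inorder value segments, builds the tree's postorder list by the classic slice-based recursion (left + right + [root], positions found with list.index), writes it into s with one slice assignment, and returns si minus its length.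
-- outside the precondition, e.g. on set_pos([5], -1, -1, [5], 0, 0, [0], 0, {5: 0}): A returns -1, B returns 0
import Mathlib
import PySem

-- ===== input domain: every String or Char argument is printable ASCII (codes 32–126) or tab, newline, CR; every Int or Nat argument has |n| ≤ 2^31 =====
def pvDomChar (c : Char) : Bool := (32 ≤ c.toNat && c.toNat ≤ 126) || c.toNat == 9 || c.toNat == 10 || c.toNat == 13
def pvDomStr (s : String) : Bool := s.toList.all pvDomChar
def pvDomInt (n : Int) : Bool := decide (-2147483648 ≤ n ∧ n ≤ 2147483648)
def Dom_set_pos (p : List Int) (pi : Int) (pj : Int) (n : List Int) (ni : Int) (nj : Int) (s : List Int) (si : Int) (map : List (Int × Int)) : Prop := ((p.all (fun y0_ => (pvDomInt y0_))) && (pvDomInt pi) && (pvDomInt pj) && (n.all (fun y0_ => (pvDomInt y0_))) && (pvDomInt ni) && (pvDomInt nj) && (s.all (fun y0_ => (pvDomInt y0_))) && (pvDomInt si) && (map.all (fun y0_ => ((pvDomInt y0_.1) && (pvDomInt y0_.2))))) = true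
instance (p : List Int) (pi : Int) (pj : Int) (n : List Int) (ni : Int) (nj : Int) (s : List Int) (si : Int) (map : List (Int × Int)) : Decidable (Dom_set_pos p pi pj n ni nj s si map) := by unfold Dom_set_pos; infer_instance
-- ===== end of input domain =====

-- B replaces A's index-range double recursion by the classic slice-based postorder
-- construction: it slices out the preorder/inorder value segments, builds the postorder
-- list (left ++ right ++ [root], with list.index), writes it with one slice assignment and
-- returns si minus its length (objective: alternative algorithm, not faster).  Both Pythons
-- mutate the list `s` in place to the same final contents (A element-by-element downward,
-- B by one slice assignment); the equivalence proved here is about the RETURN value.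

-- ===== PORT A =====
-- Recursion of A, made total with a fuel guard (fuel only makes the same computation total;
-- on every input admitted by Pre_ the guard never fires).  The mutated list `s` is threaded
-- through as state, the returned Int is Python's return value.  `none` branches of pyGet?/
-- pySet?/lookup are Python's IndexError / TypeError (map.get -> None); those inputs are
-- outside Pre_ and the values returned there are not claimed.
def setPosRec (p n : List Int) (map : List (Int × Int)) : Nat → Int → Int → Int → Int → List Int → Int → List Int × Int
  | 0, _, _, _, _, s, si => (s, si)
  | fuel+1, pi, pj, ni, nj, s, si =>
    if pi > pj then (s, si)
    else
      match PySem.List.pyGet? p pi with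
      | none => (s, si)                      -- p[pi] : IndexError
      | some v =>
        match PySem.List.pySet? s si v with
        | none => (s, si)                    -- s[si] = … : IndexError
        | some s1 =>
          match List.lookup v map with
          | none => (s1, si - 1)             -- map.get(p[pi]) is None : TypeError downstream
          | some i =>
            let r := setPosRec p n map fuel (pj - nj + i + 1) pj (i + 1) nj s1 (si - 1)
            setPosRec p n map fuel (pi + 1) (pi + i - ni) ni (i - 1) r.1 r.2

def set_pos (p : List Int) (pi : Int) (pj : Int) (n : List Int) (ni : Int) (nj : Int) (s : List Int) (si : Int) (map : List (Int × Int)) : Int :=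
  (setPosRec p n map (pj - pi + 2).toNat pi pj ni nj s si).2

-- ===== PORT B =====
-- Source B's helper _post(pre, ino) on the sliced value lists; the fuel guard (pre.length + 1 at
-- the top call) only makes the same recursion total — each recursive call strictly shrinks
-- pre, so on every admitted input the 0-fuel branch is unreachable.  `none` is Python's
-- ValueError from ino.index(root).
def postB : Nat → List Int → List Int → Option (List Int)
  | _, [], _ => some []
  | 0, _ :: _, _ => none
  | fuel+1, root :: rest, ino =>
    match PySem.List.index? ino root with
    | none => none                          -- ino.index(root) : ValueError
    | some k =>
      match postB fuel (PySem.List.slice (root :: rest) (some 1) (some ((k : Int) + 1))) (PySem.List.slice ino none (some (k : Int))),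
            postB fuel (PySem.List.slice (root :: rest) (some ((k : Int) + 1)) none) (PySem.List.slice ino (some ((k : Int) + 1)) none) with
      | some L, some R => some (L ++ R ++ [root])
      | _, _ => none

-- Source B's slice assignment s[si-len(out)+1 : si+1] = out mutates only `s` and cannot change
-- the returned value, so it has no counterpart in this Int-valued port.
def set_pos_alt (p : List Int) (pi : Int) (pj : Int) (n : List Int) (ni : Int) (nj : Int) (s : List Int) (si : Int) (map : List (Int × Int)) : Int :=
  if pi > pj then si
  else
    let pre := PySem.List.slice p (some pi) (some (pj + 1))
    let ino := PySem.List.slice n (some ni) (some (nj + 1))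
    match postB (pre.length + 1) pre ino with
    | none => si                            -- Python raises ValueError here; outside Pre_
    | some out => si - out.length

-- ===== PRECONDITION & SPEC =====

-- The segment xs[a..b] (inclusive ends, nonnegative indices).
def segOf (xs : List Int) (a b : Int) : List Int := (xs.drop a.toNat).take (b - a + 1).toNat

-- `consistent ps ns` is the SHAPE of the data the function is for: ps and ns are the
-- preorder and inorder listings of one and the same binary tree (the root ps.head sits at
-- position k of ns, and the parts left and right of it again form such a pair).  It is a
-- structural condition on the two value lists alone — it mentions none of A's state
-- (no index tuples, no map lookups, no cursor si) — and is recursive only because "is a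
-- traversal pair of a tree" is an inductive shape; `d`, a bound on ns.length, only makes the
-- recursion structural so that `decide` can evaluate it.
def consistentF : Nat → List Int → List Int → Bool
  | _, [], [] => true
  | _, [], _ :: _ => false
  | 0, _ :: _, _ => false
  | d+1, v :: rest, ns =>
    match List.idxOf? v ns with
    | none => false
    | some k => consistentF d (rest.take k) (ns.take k) && consistentF d (rest.drop k) (ns.drop (k+1))

def consistent (ps ns : List Int) : Bool := consistentF ns.length ps ns

-- The invariant of a consistent call: index ranges in bounds and of equal length, room for
-- the writes below si, the inorder segment duplicate-free, map giving each inorder value its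
-- absolute index in n, and the two segments traversals of one tree.
def Good (p n : List Int) (map : List (Int × Int)) (slen : Nat) (pi pj ni nj si : Int) : Prop :=
  0 ≤ pi ∧ pj < p.length ∧ 0 ≤ ni ∧ nj < n.length ∧ pj - pi = nj - ni ∧
  si < slen ∧ pj - pi ≤ si ∧
  (segOf n ni nj).Nodup ∧
  (∀ (j : Nat) (h : j < (segOf n ni nj).length), List.lookup ((segOf n ni nj)[j]) map = some (ni + j)) ∧
  consistent (segOf p pi pj) (segOf n ni nj) = true

-- Pre_ excludes the inputs that are not a consistent preorder/inorder/index-map instance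
-- (unless the range is empty, where A returns si at once): on those A raises (TypeError on a
-- None from map.get, IndexError, RecursionError) or recurses forever; on the rare
-- inconsistent-but-terminating corners (e.g. negative-index wraparound) the claim does not
-- cover A's accidental value.
def Pre_set_pos (p : List Int) (pi : Int) (pj : Int) (n : List Int) (ni : Int) (nj : Int) (s : List Int) (si : Int) (map : List (Int × Int)) : Prop :=
  pj < pi ∨ Good p n map s.length pi pj ni nj si
instance (p : List Int) (pi : Int) (pj : Int) (n : List Int) (ni : Int) (nj : Int) (s : List Int) (si : Int) (map : List (Int × Int)) : Decidable (Pre_set_pos p pi pj n ni nj s si map) := by unfold Pre_set_pos Good; infer_instance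

def pvWitness_set_pos : List Int × Int × Int × List Int × Int × Int × List Int × Int × (List (Int × Int)) :=
  ([2, 1, 3], 0, 2, [1, 2, 3], 0, 2, [0, 0, 0], 2, [(1, 0), (2, 1), (3, 2)])

def Spec_set_pos (p : List Int) (pi : Int) (pj : Int) (n : List Int) (ni : Int) (nj : Int) (s : List Int) (si : Int) (map : List (Int × Int)) (out : Int) : Prop := out = set_pos_alt p pi pj n ni nj s si map
instance (p : List Int) (pi : Int) (pj : Int) (n : List Int) (ni : Int) (nj : Int) (s : List Int) (si : Int) (map : List (Int × Int)) (out : Int) : Decidable (Spec_set_pos p pi pj n ni nj s si map out) := by unfold Spec_set_pos; infer_instance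

-- ===== CLAIM (what is proved, stated in full; the proofs are below) =====
def Claim_equal_set_pos : Prop := ∀ (p : List Int) (pi : Int) (pj : Int) (n : List Int) (ni : Int) (nj : Int) (s : List Int) (si : Int) (map : List (Int × Int)), Dom_set_pos p pi pj n ni nj s si map → Pre_set_pos p pi pj n ni nj s si map → Spec_set_pos p pi pj n ni nj s si map (set_pos p pi pj n ni nj s si map)

-- ===== LEMMAS AND PROOFS =====

theorem pvWitness_ok :
    Dom_set_pos pvWitness_set_pos.1 pvWitness_set_pos.2.1 pvWitness_set_pos.2.2.1 pvWitness_set_pos.2.2.2.1 pvWitness_set_pos.2.2.2.2.1 pvWitness_set_pos.2.2.2.2.2.1 pvWitness_set_pos.2.2.2.2.2.2.1 pvWitness_set_pos.2.2.2.2.2.2.2.1 pvWitness_set_pos.2.2.2.2.2.2.2.2 ∧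
    Pre_set_pos pvWitness_set_pos.1 pvWitness_set_pos.2.1 pvWitness_set_pos.2.2.1 pvWitness_set_pos.2.2.2.1 pvWitness_set_pos.2.2.2.2.1 pvWitness_set_pos.2.2.2.2.2.1 pvWitness_set_pos.2.2.2.2.2.2.1 pvWitness_set_pos.2.2.2.2.2.2.2.1 pvWitness_set_pos.2.2.2.2.2.2.2.2 := by
  decide

theorem segOf_length (xs : List Int) (a b : Int) (h0 : 0 ≤ a) (hb : b < xs.length) :
    (segOf xs a b).length = (b - a + 1).toNat := by
  simp [segOf]; omega

theorem segOf_cons (xs : List Int) (a b : Int) (h0 : 0 ≤ a) (hab : a ≤ b)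
    (ha : a.toNat < xs.length) :
    segOf xs a b = xs[a.toNat] :: segOf xs (a+1) b := by
  unfold segOf
  rw [List.drop_eq_getElem_cons ha]
  have h1 : (b - a + 1).toNat = (b - (a+1) + 1).toNat + 1 := by omega
  have h2 : (a+1).toNat = a.toNat + 1 := by omega
  rw [h1, h2, List.take_succ_cons]

theorem segOf_take (xs : List Int) (a b : Int) (m : Nat) (_h0 : 0 ≤ a) (hm : (m : Int) ≤ b - a + 1) :
    (segOf xs a b).take m = segOf xs a (a + m - 1) := by
  unfold segOf
  rw [List.take_take]
  have h1 : min m (b - a + 1).toNat = m := by omega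
  have h2 : (a + m - 1 - a + 1).toNat = m := by omega
  rw [h1, h2]

theorem segOf_drop (xs : List Int) (a b : Int) (m : Nat) (h0 : 0 ≤ a) :
    (segOf xs a b).drop m = segOf xs (a + m) b := by
  unfold segOf
  rw [List.drop_take, List.drop_drop]
  have h1 : (b - a + 1).toNat - m = (b - (a + m) + 1).toNat := by omega
  have h2 : a.toNat + m = (a + m).toNat := by omega
  rw [h1, h2]

theorem consistentF_congr : ∀ (fuel fuel' : Nat) (ps ns : List Int),
    ns.length ≤ fuel → ns.length ≤ fuel' → consistentF fuel ps ns = consistentF fuel' ps ns := by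
  intro fuel
  induction fuel with
  | zero =>
    intro fuel' ps ns h h'
    have : ns = [] := by cases ns <;> simp_all
    subst this
    cases ps <;> cases fuel' <;> rfl
  | succ f IH =>
    intro fuel' ps ns h h'
    cases ps with
    | nil => cases ns <;> cases fuel' <;> simp_all [consistentF]
    | cons v rest =>
      cases ns with
      | nil =>
        cases fuel' <;> simp [consistentF]
      | cons w t =>
        cases fuel' with
        | zero => simp at h'
        | succ f' =>
          simp only [consistentF]
          cases hidx : List.idxOf? v (w :: t) with
          | none => rfl
          | some k =>
            dsimp only
            have hk : k ≤ t.length := by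
              have := (List.idxOf?_eq_some_iff.mp hidx).1; simpa using this
            have hf : t.length ≤ f := by simpa using h
            have hf' : t.length ≤ f' := by simpa using h'
            rw [IH f' (rest.take k) ((w :: t).take k)
                  (by simp only [List.length_take, List.length_cons]; omega)
                  (by simp only [List.length_take, List.length_cons]; omega),
                IH f' (rest.drop k) ((w :: t).drop (k+1))
                  (by simp only [List.length_drop, List.length_cons]; omega)
                  (by simp only [List.length_drop, List.length_cons]; omega)]

theorem consistent_cons_none (v : Int) (rest ns : List Int) (h : List.idxOf? v ns = none) :
    consistent (v :: rest) ns = false := by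
  unfold consistent
  cases ns with
  | nil => rfl
  | cons w t => simp [consistentF, h]

theorem consistent_cons (v : Int) (rest ns : List Int) (k : Nat) (h : List.idxOf? v ns = some k) :
    consistent (v :: rest) ns
      = (consistent (rest.take k) (ns.take k) && consistent (rest.drop k) (ns.drop (k+1))) := by
  have hk : k < ns.length := (List.idxOf?_eq_some_iff.mp h).1
  unfold consistent
  cases ns with
  | nil => simp at hk
  | cons w t =>
    have hk2 : k ≤ t.length := by simpa using hk
    simp only [List.length_cons, consistentF, h]
    rw [consistentF_congr t.length ((w :: t).take k).length (rest.take k) ((w :: t).take k)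
          (by simp only [List.length_take, List.length_cons]; omega) (le_refl _),
        consistentF_congr t.length ((w :: t).drop (k+1)).length (rest.drop k) ((w :: t).drop (k+1))
          (by simp only [List.length_drop, List.length_cons]; omega) (le_refl _)]

theorem good_step (p n : List Int) (map : List (Int × Int)) (slen : Nat)
    (pi pj ni nj si : Int) (hle : pi ≤ pj) (hG : Good p n map slen pi pj ni nj si) :
    ∃ (v i : Int),
      PySem.List.pyGet? p pi = some v ∧
      (∀ s : List Int, s.length = slen → ∃ s1, PySem.List.pySet? s si v = some s1 ∧ s1.length = slen) ∧
      List.lookup v map = some i ∧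
      ni ≤ i ∧ i ≤ nj ∧
      Good p n map slen (pj - nj + i + 1) pj (i + 1) nj (si - 1) ∧
      Good p n map slen (pi + 1) (pi + i - ni) ni (i - 1) (si - 1 - (nj - i)) ∧
      (pj - (pj - nj + i + 1) + 1).toNat = (nj - i).toNat ∧
      ((pi + i - ni) - (pi + 1) + 1).toNat = (i - ni).toNat ∧
      (nj - i).toNat + (i - ni).toNat + 1 = (pj - pi + 1).toNat := by
  obtain ⟨h1, h2, h3, h4, h5, h6, h7, hnd, hlk, hcons⟩ := hG
  have hpa : pi.toNat < p.length := by omega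
  have hnlen : (segOf n ni nj).length = (nj - ni + 1).toNat := segOf_length n ni nj h3 h4
  set v := p[pi.toNat] with hv
  have hget : PySem.List.pyGet? p pi = some v :=
    PySem.List.pyGet?_eq_some_getElem p h1 (by exact_mod_cast by omega)
  have hp : segOf p pi pj = v :: segOf p (pi+1) pj := segOf_cons p pi pj h1 hle hpa
  rw [hp] at hcons
  cases hidx : List.idxOf? v (segOf n ni nj) with
  | none => rw [consistent_cons_none v _ _ hidx] at hcons; simp at hcons
  | some k =>
  obtain ⟨hklt, hkval, -⟩ := List.idxOf?_eq_some_iff.mp hidx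
  rw [consistent_cons v _ _ k hidx, Bool.and_eq_true] at hcons
  obtain ⟨hcL, hcR⟩ := hcons
  refine ⟨v, ni + k, hget, ?_, ?_, by omega, by omega, ?_, ?_, by omega, by omega, by omega⟩
  · -- pySet?
    intro s hs
    have hsn : si = ((si.toNat : Nat) : Int) := by omega
    refine ⟨s.set si.toNat v, ?_, by simp [hs]⟩
    rw [hsn]
    exact PySem.List.pySet?_natCast s si.toNat v (by omega)
  · -- lookup
    have := hlk k hklt
    rwa [hkval] at this
  · -- right Good
    have hki : (k : Int) ≤ nj - ni := by omega
    have hrn : segOf n (ni + k + 1) nj = (segOf n ni nj).drop (k+1) := by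
      rw [segOf_drop n ni nj (k+1) h3]; congr 1; push_cast; ring
    have hrp : segOf p (pj - nj + (ni + k) + 1) pj = (segOf p (pi+1) pj).drop k := by
      rw [segOf_drop p (pi+1) pj k (by omega)]; congr 1; omega
    refine ⟨by omega, h2, by omega, h4, by omega, by omega, by omega, ?_, ?_, ?_⟩
    · rw [hrn]
      exact (List.drop_sublist _ _).nodup hnd
    · intro j hj
      simp only [hrn] at hj ⊢
      rw [List.getElem_drop]
      have hb : k + 1 + j < (segOf n ni nj).length := by
        simp only [List.length_drop] at hj; omega
      have := hlk (k + 1 + j) hb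
      rw [this]; congr 1; push_cast; ring_nf
    · rw [hrn, hrp]
      exact hcR
  · -- left Good
    have hki : (k : Int) ≤ nj - ni := by omega
    have hln : segOf n ni ((ni + k) - 1) = (segOf n ni nj).take k := by
      exact (segOf_take n ni nj k h3 (by omega)).symm
    have hlp : segOf p (pi + 1) (pi + (ni + k) - ni) = (segOf p (pi+1) pj).take k := by
      rw [segOf_take p (pi+1) pj k (by omega) (by omega)]; congr 1; omega
    refine ⟨by omega, by omega, h3, by omega, by omega, by omega, by omega, ?_, ?_, ?_⟩
    · rw [hln]; exact (List.take_sublist _ _).nodup hnd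
    · intro j hj
      simp only [hln] at hj ⊢
      rw [List.getElem_take]
      have hb : j < (segOf n ni nj).length := by
        simp only [List.length_take] at hj; omega
      exact hlk j hb
    · rw [hln, hlp]; exact hcL

theorem setPosRec_run (p n : List Int) (map : List (Int × Int)) :
    ∀ sz : Nat, ∀ (pi pj ni nj si : Int) (s : List Int) (fuel : Nat),
      (pj - pi + 1).toNat = sz → sz < fuel →
      (pi ≤ pj → Good p n map s.length pi pj ni nj si) →
      (setPosRec p n map fuel pi pj ni nj s si).1.length = s.length ∧
      (setPosRec p n map fuel pi pj ni nj s si).2 = si - sz := by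
  intro sz
  induction sz using Nat.strong_induction_on with
  | _ sz IH =>
    intro pi pj ni nj si s fuel hsz hfuel hG
    obtain ⟨fuel, rfl⟩ : ∃ f, fuel = f + 1 := ⟨fuel - 1, by omega⟩
    by_cases hgt : pi > pj
    · have : sz = 0 := by omega
      subst this
      simp [setPosRec, hgt]
    · rw [not_lt] at hgt
      obtain ⟨v, i, hget, hset, hlkv, hi1, hi2, hGr, hGl, hszr, hszl, hsum⟩ :=
        good_step p n map s.length pi pj ni nj si hgt (hG hgt)
      obtain ⟨s1, hset1, hlen1⟩ := hset s rfl
      simp only [setPosRec, if_neg (by omega : ¬ pi > pj), hget, hset1, hlkv]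
      have hr := IH (nj - i).toNat (by omega) (pj - nj + i + 1) pj (i + 1) nj (si - 1) s1 fuel
        hszr (by omega) (fun _ => by rwa [hlen1])
      obtain ⟨hrlen, hrval⟩ := hr
      have hl := IH (i - ni).toNat (by omega) (pi + 1) (pi + i - ni) ni (i - 1)
        ((setPosRec p n map fuel (pj - nj + i + 1) pj (i + 1) nj s1 (si - 1)).2)
        ((setPosRec p n map fuel (pj - nj + i + 1) pj (i + 1) nj s1 (si - 1)).1) fuel
        hszl (by omega)
        (fun _ => by
          rw [hrlen, hlen1, hrval, show ((nj - i).toNat : Int) = nj - i by omega]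
          exact hGl)
      obtain ⟨hllen, hlval⟩ := hl
      constructor
      · rw [hllen, hrlen, hlen1]
      · rw [hlval, hrval]; omega

-- B-side: on a consistent traversal pair, postB returns a list of the same length as pre.
theorem postB_run : ∀ (fuel : Nat) (pre ino : List Int),
    pre.length < fuel → consistent pre ino = true →
    ∃ out, postB fuel pre ino = some out ∧ out.length = pre.length := by
  intro fuel
  induction fuel with
  | zero => intro pre ino h _; omega
  | succ f IH =>
    intro pre ino hlen hcons
    cases pre with
    | nil => exact ⟨[], rfl, rfl⟩
    | cons root rest =>
      cases hidx : List.idxOf? root ino with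
      | none =>
        rw [consistent_cons_none root rest ino hidx] at hcons; simp at hcons
      | some k =>
        rw [consistent_cons root rest ino k hidx, Bool.and_eq_true] at hcons
        obtain ⟨hcL, hcR⟩ := hcons
        have hsl : PySem.List.slice (root :: rest) (some 1) (some ((k : Int) + 1)) = rest.take k := by
          rw [show ((k : Int) + 1) = (((k + 1 : Nat) : Int)) by push_cast; ring,
              show (1 : Int) = ((1 : Nat) : Int) by norm_num,
              PySem.List.slice_natCast]
          simp
        have hsl2 : PySem.List.slice ino none (some (k : Int)) = ino.take k :=
          PySem.List.slice_to_natCast ino k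
        have hsr : PySem.List.slice (root :: rest) (some ((k : Int) + 1)) none = rest.drop k := by
          rw [show ((k : Int) + 1) = (((k + 1 : Nat) : Int)) by push_cast; ring,
              PySem.List.slice_from_natCast]
          simp
        have hsr2 : PySem.List.slice ino (some ((k : Int) + 1)) none = ino.drop (k + 1) := by
          rw [show ((k : Int) + 1) = (((k + 1 : Nat) : Int)) by push_cast; ring,
              PySem.List.slice_from_natCast]
        obtain ⟨L, hL, hLlen⟩ := IH (rest.take k) (ino.take k)
          (by simp only [List.length_take, List.length_cons] at hlen ⊢; omega) hcL
        obtain ⟨R, hR, hRlen⟩ := IH (rest.drop k) (ino.drop (k+1))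
          (by simp only [List.length_drop, List.length_cons] at hlen ⊢; omega) hcR
        refine ⟨L ++ R ++ [root], ?_, ?_⟩
        · simp only [postB, PySem.List.index?_eq_idxOf?, hidx, hsl, hsl2, hsr, hsr2, hL, hR]
        · simp only [List.length_append, List.length_cons, List.length_nil,
            List.length_take, List.length_drop] at hLlen hRlen ⊢
          omega

-- The slices Source B takes are exactly the segments the invariant speaks about.
theorem slice_eq_segOf (xs : List Int) (a b : Int) (h0 : 0 ≤ a) (hab : a ≤ b + 1) :
    PySem.List.slice xs (some a) (some (b + 1)) = segOf xs a b := by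
  rw [PySem.List.slice_toNat xs h0 (by omega : (0:Int) ≤ b + 1)]
  unfold segOf
  congr 1
  omega

-- ===== VERDICT (by name: the statement is the Claim_ definition above) =====
theorem set_pos_spec : Claim_equal_set_pos := by
  intro p pi pj n ni nj s si map _hDom hPre
  unfold Spec_set_pos set_pos set_pos_alt
  by_cases hgt : pi > pj
  · have hA : (setPosRec p n map (pj - pi + 2).toNat pi pj ni nj s si).2 = si := by
      cases h : (pj - pi + 2).toNat with
      | zero => simp [setPosRec]
      | succ f => simp [setPosRec, hgt]
    rw [hA, if_pos hgt]
  · rw [not_lt] at hgt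
    have hGood : Good p n map s.length pi pj ni nj si := by
      rcases hPre with h | h
      · omega
      · exact h
    have hA := setPosRec_run p n map (pj - pi + 1).toNat pi pj ni nj si s
      ((pj - pi + 2).toNat) rfl (by omega) (fun _ => hGood)
    obtain ⟨h1, h2, h3, h4, h5, _, _, _, _, hcons⟩ := hGood
    have hpre : PySem.List.slice p (some pi) (some (pj + 1)) = segOf p pi pj :=
      slice_eq_segOf p pi pj h1 (by omega)
    have hino : PySem.List.slice n (some ni) (some (nj + 1)) = segOf n ni nj :=
      slice_eq_segOf n ni nj h3 (by omega)
    have hplen : (segOf p pi pj).length = (pj - pi + 1).toNat := segOf_length p pi pj h1 h2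
    obtain ⟨out, hout, houtlen⟩ := postB_run ((segOf p pi pj).length + 1)
      (segOf p pi pj) (segOf n ni nj) (by omega) hcons
    rw [hA.2, if_neg (by omega : ¬ pi > pj)]
    simp only [hpre, hino]
    rw [hout]
    dsimp only
    rw [houtlen, hplen]
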